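-- pv_equiv track=rewrite | github.com/goerz-research/cirac_state_transfer | notebook_importing.py | filter_code
-- ===== SOURCE A (Python) =====
-- def filter_code(code):
--     """Filter out code lines that we do not want to run
--
--     We only keep imports and definitions of functions or classes, but no other
--     "top level code"
--     """
--     lines = []
--     in_block = False
--     for line in code.splitlines():
--         if in_block:
--             if len(line) > 0 and not line.startswith("    "):
--                 in_block = False
--         if line.startswith("def ") or line.startswith("class "):
--             in_block = True
--         if line.startswith("import "):
--             lines.append(line)
--         elif in_block:
--             lines.append(line)
--     return "\n".join(lines)
-- ===== SOURCE B (Python) =====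
-- def filter_code(code):
--     """Filter out code lines that we do not want to run
--
--     We only keep imports and definitions of functions or classes, but no other
--     "top level code"
--     """
--     lines = code.splitlines()
--     out = []
--     i = 0
--     n = len(lines)
--     while i < n:
--         line = lines[i]
--         if line.startswith("def ") or line.startswith("class "):
--             out.append(line)
--             i += 1
--             while i < n and (lines[i] == "" or lines[i].startswith("    ")):
--                 out.append(lines[i])
--                 i += 1
--         elif line.startswith("import "):
--             out.append(line)
--             i += 1
--         else:
--             i += 1
--     return "\n".join(out)
-- ===== Notes on version B (the rewrite author's own statement) =====
-- stated objective: alternative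
-- what changed: Replaced the in_block boolean state machine (state carried across every line) with an index-driven scan that, on a def/class header, consumes the whole indented/empty block in an inner while loop and re-examines the first non-block line in the outer loop.
import Mathlib
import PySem

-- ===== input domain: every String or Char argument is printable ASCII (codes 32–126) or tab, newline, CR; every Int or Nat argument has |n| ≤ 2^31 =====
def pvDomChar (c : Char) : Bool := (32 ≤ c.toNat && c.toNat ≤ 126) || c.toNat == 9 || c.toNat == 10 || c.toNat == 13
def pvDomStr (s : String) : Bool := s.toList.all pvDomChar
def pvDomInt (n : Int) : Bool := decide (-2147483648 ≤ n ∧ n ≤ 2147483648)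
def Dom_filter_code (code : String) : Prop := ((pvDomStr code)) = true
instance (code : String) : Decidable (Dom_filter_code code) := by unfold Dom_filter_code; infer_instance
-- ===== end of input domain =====

-- B replaces A's in_block boolean state machine with an index-driven scan that consumes
-- each def/class block in an inner loop (objective: alternative decomposition, same cost).

-- ===== PORT A =====
-- A's loop body: state (lines accumulated so far, in_block)
def pvStepA (st : List String × Bool) (line : String) : List String × Bool :=
  let in_block := st.2
  let in_block := if in_block && decide (0 < PySem.Str.len line) && !(PySem.Str.startswith line "    ") then false else in_block
  let in_block := if PySem.Str.startswith line "def " || PySem.Str.startswith line "class " then true else in_block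
  let lines := if PySem.Str.startswith line "import " then st.1 ++ [line]
               else if in_block then st.1 ++ [line]
               else st.1
  (lines, in_block)

def filter_code (code : String) : String :=
  PySem.Str.join "\n" ((PySem.Str.splitlines code).foldl pvStepA ([], false)).1

-- ===== PORT B =====
-- the inner `while` of Source B: returns (block lines consumed, remaining lines)
def pvBlockSpan : List String → List String × List String
  | [] => ([], [])
  | l :: ls =>
    if l == "" || PySem.Str.startswith l "    " then
      let p := pvBlockSpan ls
      (l :: p.1, p.2)
    else ([], l :: ls)

theorem pvBlockSpan_snd_le (ls : List String) : (pvBlockSpan ls).2.length ≤ ls.length := by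
  induction ls with
  | nil => simp [pvBlockSpan]
  | cons l ls ih =>
    simp only [pvBlockSpan]
    split
    · exact Nat.le_succ_of_le ih
    · simp

-- the outer loop of Source B over the remaining lines
def pvGoAlt : List String → List String
  | [] => []
  | l :: ls =>
    if PySem.Str.startswith l "def " || PySem.Str.startswith l "class " then
      let p := pvBlockSpan ls
      l :: (p.1 ++ pvGoAlt p.2)
    else if PySem.Str.startswith l "import " then
      l :: pvGoAlt ls
    else
      pvGoAlt ls
termination_by ls => ls.length
decreasing_by
  · exact Nat.lt_succ_of_le (pvBlockSpan_snd_le ls)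
  · simp
  · simp

def filter_code_alt (code : String) : String :=
  PySem.Str.join "\n" (pvGoAlt (PySem.Str.splitlines code))

-- ===== PRECONDITION & SPEC =====
def Spec_filter_code (code : String) (out : String) : Prop := out = filter_code_alt code
instance (code : String) (out : String) : Decidable (Spec_filter_code code out) := by unfold Spec_filter_code; infer_instance

-- ===== CLAIM (what is proved, stated in full; the proofs are below) =====
def Claim_equal_filter_code : Prop := ∀ (code : String), Dom_filter_code code → Spec_filter_code code (filter_code code)

-- ===== LEMMAS AND PROOFS =====

-- the in_block value after A processes line l from state inb
def pvInb2 (inb : Bool) (l : String) : Bool :=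
  if PySem.Str.startswith l "def " || PySem.Str.startswith l "class " then true
  else if inb && decide (0 < PySem.Str.len l) && !(PySem.Str.startswith l "    ") then false
  else inb

-- the lines A emits when processing l from state inb
def pvEmitA (inb : Bool) (l : String) : List String :=
  if PySem.Str.startswith l "import " then [l]
  else if pvInb2 inb l then [l]
  else []

theorem pvStepA_eq (acc : List String) (inb : Bool) (l : String) :
    pvStepA (acc, inb) l = (acc ++ pvEmitA inb l, pvInb2 inb l) := by
  simp only [pvStepA, pvEmitA, pvInb2]
  split_ifs <;> simp_all

-- A's loop as a recursion producing only the lines emitted from state inb onward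
def pvGoA (inb : Bool) : List String → List String
  | [] => []
  | l :: ls => pvEmitA inb l ++ pvGoA (pvInb2 inb l) ls

theorem pvFoldA_eq (ls : List String) (acc : List String) (inb : Bool) :
    (ls.foldl pvStepA (acc, inb)).1 = acc ++ pvGoA inb ls := by
  induction ls generalizing acc inb with
  | nil => simp [pvGoA]
  | cons l ls ih => simp only [List.foldl_cons, pvStepA_eq, ih, pvGoA, List.append_assoc]

-- if l starts with a, and a and b are not prefixes of one another, l does not start with b
theorem pv_sw_false (l a b : String) (h : PySem.Str.startswith l a = true)
    (h1 : PySem.Chars.startswith a.toList b.toList = false)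
    (h2 : PySem.Chars.startswith b.toList a.toList = false) :
    PySem.Str.startswith l b = false := by
  rw [PySem.Str.startswith_eq] at h ⊢
  rw [PySem.Chars.startswith_iff] at h
  rw [Bool.eq_false_iff]
  intro hb
  rw [PySem.Chars.startswith_iff] at hb
  rcases List.prefix_or_prefix_of_prefix h hb with hab | hba
  · exact (Bool.eq_false_iff.mp h2) ((PySem.Chars.startswith_iff _ _).mpr hab)
  · exact (Bool.eq_false_iff.mp h1) ((PySem.Chars.startswith_iff _ _).mpr hba)

theorem pv_empty_sw (l p : String) (h : (l == "") = true) (hp : p ≠ "") :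
    PySem.Str.startswith l p = false := by
  have hl : l = "" := by simpa using h
  subst hl
  rw [PySem.Str.startswith_eq, Bool.eq_false_iff]
  intro hb
  have h2 := (PySem.Chars.startswith_iff _ _).mp hb
  have hnil : p.toList = [] := List.prefix_nil.mp (by simpa using h2)
  exact hp (String.toList_inj.mp (by simp [hnil]))

theorem pv_len_pos (l : String) (h : (l == "") = false) : decide (0 < PySem.Str.len l) = true := by
  rw [PySem.Str.len_eq]
  simp only [decide_eq_true_eq]
  have hne : l ≠ "" := by simpa using h
  have hnil : l.toList ≠ [] := fun hl => hne (String.toList_inj.mp (by simp [hl]))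
  have := List.length_pos_iff.mpr hnil
  omega

theorem pvGoAlt_cons (x : String) (xs : List String) :
    pvGoAlt (x :: xs) =
      if PySem.Str.startswith x "def " || PySem.Str.startswith x "class " then
        x :: ((pvBlockSpan xs).1 ++ pvGoAlt (pvBlockSpan xs).2)
      else if PySem.Str.startswith x "import " then x :: pvGoAlt xs
      else pvGoAlt xs := by
  rw [pvGoAlt.eq_def]

theorem pvGo_eq (ls : List String) :
    pvGoA false ls = pvGoAlt ls ∧
    pvGoA true ls = (pvBlockSpan ls).1 ++ pvGoAlt (pvBlockSpan ls).2 := by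
  induction ls with
  | nil => simp [pvGoA, pvGoAlt, pvBlockSpan]
  | cons l ls ih =>
    obtain ⟨ihF, ihT⟩ := ih
    by_cases hdc : (PySem.Str.startswith l "def " || PySem.Str.startswith l "class ") = true
    · -- header line: both states enter the block
      have himp : PySem.Str.startswith l "import " = false := by
        rcases Bool.or_eq_true _ _ |>.mp hdc with h | h
        · exact pv_sw_false l "def " "import " h (by decide) (by decide)
        · exact pv_sw_false l "class " "import " h (by decide) (by decide)
      have hblk : (l == "" || PySem.Str.startswith l "    ") = false := by
        rcases Bool.or_eq_true _ _ |>.mp hdc with h | h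
        · simp only [Bool.or_eq_false_iff]
          refine ⟨Bool.eq_false_iff.mpr fun he => ?_, pv_sw_false l "def " "    " h (by decide) (by decide)⟩
          exact absurd h (by rw [pv_empty_sw l "def " he (by decide)]; simp)
        · simp only [Bool.or_eq_false_iff]
          refine ⟨Bool.eq_false_iff.mpr fun he => ?_, pv_sw_false l "class " "    " h (by decide) (by decide)⟩
          exact absurd h (by rw [pv_empty_sw l "class " he (by decide)]; simp)
      have himp' : ¬ (PySem.Str.startswith l "import " = true) := Bool.eq_false_iff.mp himp
      have hblk' : ¬ ((l == "" || PySem.Str.startswith l "    ") = true) := Bool.eq_false_iff.mp hblk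
      have hi2 : ∀ inb, pvInb2 inb l = true := fun inb => by
        rw [pvInb2, if_pos hdc]
      have hem : ∀ inb, pvEmitA inb l = [l] := fun inb => by
        rw [pvEmitA, if_neg himp', if_pos (hi2 inb)]
      constructor
      · simp only [pvGoA, hem, hi2, ihT, pvGoAlt_cons, if_pos hdc, List.cons_append,
          List.nil_append]
      · simp only [pvGoA, pvBlockSpan, hem, hi2, ihT, pvGoAlt_cons, if_pos hdc, if_neg hblk',
          List.cons_append, List.nil_append]
    · -- not a header
      have hdc' : ¬ ((PySem.Str.startswith l "def " || PySem.Str.startswith l "class ") = true) := hdc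
      rw [Bool.not_eq_true] at hdc
      by_cases hblk : (l == "" || PySem.Str.startswith l "    ") = true
      · -- empty or indented line: consumed inside a block, skipped at top level
        have himp : PySem.Str.startswith l "import " = false := by
          rcases Bool.or_eq_true _ _ |>.mp hblk with h | h
          · exact pv_empty_sw l "import " h (by decide)
          · exact pv_sw_false l "    " "import " h (by decide) (by decide)
        have himp' : ¬ (PySem.Str.startswith l "import " = true) := Bool.eq_false_iff.mp himp
        have hcond : ∀ inb : Bool, (inb && decide (0 < PySem.Str.len l) && !(PySem.Str.startswith l "    ")) = false := by
          intro inb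
          rcases Bool.or_eq_true _ _ |>.mp hblk with h | h
          · have hl : l = "" := by simpa using h
            rw [hl]; cases inb <;> decide
          · rw [h]; simp
        have hi2 : ∀ inb, pvInb2 inb l = inb := fun inb => by
          rw [pvInb2, if_neg hdc', if_neg (Bool.eq_false_iff.mp (hcond inb))]
        have hemT : pvEmitA true l = [l] := by
          rw [pvEmitA, if_neg himp', if_pos (by rw [hi2])]
        have hemF : pvEmitA false l = [] := by
          rw [pvEmitA, if_neg himp', if_neg (by rw [hi2]; decide)]
        constructor
        · simp only [pvGoA, hemF, hi2, ihF, pvGoAlt_cons, if_neg hdc', if_neg himp',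
            List.nil_append]
        · simp only [pvGoA, pvBlockSpan, hemT, hi2, ihT, if_pos hblk, List.cons_append,
            List.nil_append]
      · -- ordinary non-empty non-indented line: ends any block
        have hblk' : ¬ ((l == "" || PySem.Str.startswith l "    ") = true) := hblk
        rw [Bool.not_eq_true] at hblk
        obtain ⟨hne, hnsw⟩ := Bool.or_eq_false_iff.mp hblk
        have hcond : ∀ inb : Bool, (inb && decide (0 < PySem.Str.len l) && !(PySem.Str.startswith l "    ")) = inb := by
          intro inb
          rw [pv_len_pos l hne, hnsw]
          cases inb <;> rfl
        have hi2 : ∀ inb, pvInb2 inb l = false := fun inb => by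
          rw [pvInb2, if_neg hdc']
          cases inb
          · rw [if_neg (Bool.eq_false_iff.mp (hcond false))]
          · rw [if_pos (hcond true)]
        by_cases himp : PySem.Str.startswith l "import " = true
        · have hem : ∀ inb, pvEmitA inb l = [l] := fun inb => by
            rw [pvEmitA, if_pos himp]
          constructor
          · simp only [pvGoA, hem, hi2, ihF, pvGoAlt_cons, if_neg hdc', if_pos himp,
              List.cons_append, List.nil_append]
          · simp only [pvGoA, pvBlockSpan, hem, hi2, ihF, pvGoAlt_cons, if_neg hdc',
              if_neg hblk', if_pos himp, List.cons_append, List.nil_append]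
        · have hem : ∀ inb, pvEmitA inb l = [] := fun inb => by
            rw [pvEmitA, if_neg himp, if_neg (by rw [hi2]; decide)]
          constructor
          · simp only [pvGoA, hem, hi2, ihF, pvGoAlt_cons, if_neg hdc', if_neg himp,
              List.nil_append]
          · simp only [pvGoA, pvBlockSpan, hem, hi2, ihF, pvGoAlt_cons, if_neg hdc',
              if_neg hblk', if_neg himp, List.nil_append]

-- ===== VERDICT (by name: the statement is the Claim_ definition above) =====
theorem filter_code_spec : Claim_equal_filter_code := by
  intro code _
  unfold Spec_filter_code filter_code filter_code_alt
  rw [pvFoldA_eq, (pvGo_eq (PySem.Str.splitlines code)).1]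
  simp
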